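-- pv_equiv track=rewrite | github.com/dakone22/riscv-lab-pipeline-generator | generator.py | average_signal_data_by_tick
-- ===== SOURCE A (Python) =====
-- def average_signal_data_by_tick(data):
--     data_index_by_cyc_cnt = {}
--
--     for index, cyc_cnt in enumerate(data["/tb/cyc_cnt"]):
--         if cyc_cnt.isnumeric():
--             tick = int(cyc_cnt, 2)
--             if tick not in data_index_by_cyc_cnt.keys():
--                 data_index_by_cyc_cnt[tick] = list()
--             data_index_by_cyc_cnt[tick].append(index)
--
--     data_index_list = sorted(data_index_by_cyc_cnt.items(), key=lambda item: item[0])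
--
--     return [(cyc_cnt, index_list[len(index_list) // 2]) for cyc_cnt, index_list in data_index_list]
-- ===== SOURCE B (Python) =====
-- def average_signal_data_by_tick(data):
--     column = data["/tb/cyc_cnt"]
--     pairs = [(int(s, 2), i) for i, s in enumerate(column) if s.isnumeric()]
--     ticks = sorted({t for t, _ in pairs})
--     result = []
--     for t in ticks:
--         idxs = [i for tt, i in pairs if tt == t]
--         result.append((t, idxs[len(idxs) // 2]))
--     return result
-- ===== Notes on version B (the rewrite author's own statement) =====
-- stated objective: alternative
-- what changed: A builds a dict mapping tick to its index list in one enumerate loop and then sorts the dict items; B builds a flat (tick, index) pair list, sorts the set of distinct ticks, and collects each tick's indices by filtering the pair list.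
import Mathlib
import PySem

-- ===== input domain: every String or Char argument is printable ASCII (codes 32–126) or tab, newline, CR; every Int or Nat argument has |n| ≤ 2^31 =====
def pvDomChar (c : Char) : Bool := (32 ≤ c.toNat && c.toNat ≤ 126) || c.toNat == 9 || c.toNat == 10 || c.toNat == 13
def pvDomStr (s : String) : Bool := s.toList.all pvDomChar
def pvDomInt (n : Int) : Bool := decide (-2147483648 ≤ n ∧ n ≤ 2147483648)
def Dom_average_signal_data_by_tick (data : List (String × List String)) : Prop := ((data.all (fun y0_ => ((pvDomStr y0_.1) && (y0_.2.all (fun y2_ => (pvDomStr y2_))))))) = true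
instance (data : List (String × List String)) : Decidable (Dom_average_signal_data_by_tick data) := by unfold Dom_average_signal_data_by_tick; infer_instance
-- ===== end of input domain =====

-- B replaces A's dict-grouping + sort-of-items by a flat (tick,index) pair list, a sorted set of
-- distinct ticks and a per-tick filter (alternative decomposition, similar cost on typical data).


-- ===== PORT A =====
-- data["/tb/cyc_cnt"]: first-match lookup; '.getD []' is exact under Pre_ (which excludes the KeyError).
-- cyc_cnt.isnumeric() = strIsdigit on the printable-ASCII domain; int(s, 2) = ofStrBase? s 2, whose
-- '.getD 0' fallback is exact under Pre_ (which excludes the ValueError); index_list is nonempty for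
-- every stored key, so '.getD 0' after pyGet? is exact too.
def average_signal_data_by_tick (data : List (String × List String)) : List (Int × Int) :=
  let col := (List.lookup "/tb/cyc_cnt" data).getD []
  let d := (PySem.List.enumerate col).foldl
    (fun d p =>
      if PySem.Str.strIsdigit p.2 then
        let tick : Int := (PySem.Int.ofStrBase? p.2 2).getD 0
        let d' := if d.contains tick then d else d.insert tick ([] : List Int)
        d'.modify tick [] (· ++ [p.1])
      else d)
    PySem.Dict.empty
  let data_index_list := PySem.List.sorted d.items (fun item => item.1) false
  data_index_list.map (fun q =>
    (q.1, (PySem.List.pyGet? q.2 (PySem.Int.floordiv (q.2.length : Int) 2)).getD 0))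

-- ===== PORT B =====
-- same lookup / isnumeric / int(s,2) / pyGet? conventions as port A (see comment there)
def average_signal_data_by_tick_alt (data : List (String × List String)) : List (Int × Int) :=
  let col := (List.lookup "/tb/cyc_cnt" data).getD []
  let pairs := (PySem.List.enumerate col).filterMap
    (fun p => if PySem.Str.strIsdigit p.2 then some (((PySem.Int.ofStrBase? p.2 2).getD 0 : Int), p.1) else none)
  let ticks := PySem.List.sorted (PySem.Set.ofList (pairs.map (·.1))) (fun t => t) false
  ticks.map (fun t =>
    let idxs := (pairs.filter (fun q => q.1 == t)).map (·.2)
    (t, (PySem.List.pyGet? idxs (PySem.Int.floordiv (idxs.length : Int) 2)).getD 0))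

-- ===== PRECONDITION & SPEC =====
-- Pre_ excludes exactly the inputs on which the Python A raises: a missing "/tb/cyc_cnt" key
-- (KeyError) and numeric strings with a digit other than '0'/'1', on which int(s, 2) raises
-- ValueError (B raises identically on both).
def Pre_average_signal_data_by_tick (data : List (String × List String)) : Prop :=
  (data.find? (fun q => q.1.toList = "/tb/cyc_cnt".toList)).isSome = true ∧
  ((((data.find? (fun q => q.1.toList = "/tb/cyc_cnt".toList)).map (·.2)).getD []).all
    (fun s => !(PySem.Str.strIsdigit s) || s.toList.all (fun c => c == '0' || c == '1'))) = true
instance (data : List (String × List String)) : Decidable (Pre_average_signal_data_by_tick data) := by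
  unfold Pre_average_signal_data_by_tick; infer_instance
def pvWitness_average_signal_data_by_tick : (List (String × List String)) :=
  [("/tb/cyc_cnt", ["10", "1", "x", "10", ""])]
def Spec_average_signal_data_by_tick (data : List (String × List String)) (out : List (Int × Int)) : Prop := out = average_signal_data_by_tick_alt data
instance (data : List (String × List String)) (out : List (Int × Int)) : Decidable (Spec_average_signal_data_by_tick data out) := by unfold Spec_average_signal_data_by_tick; infer_instance

-- ===== CLAIM (what is proved, stated in full; the proofs are below) =====
def Claim_equal_average_signal_data_by_tick : Prop := ∀ (data : List (String × List String)), Dom_average_signal_data_by_tick data → Pre_average_signal_data_by_tick data → Spec_average_signal_data_by_tick data (average_signal_data_by_tick data)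

-- ===== LEMMAS AND PROOFS =====

-- A's per-element body ('if tick not in keys: d[tick] = []' then append) is a single modify
lemma stepA_eq_modify (d : PySem.Dict Int (List Int)) (t : Int) (i : Int) :
    (if d.contains t then d else d.insert t ([] : List Int)).modify t [] (· ++ [i])
      = d.modify t [] (· ++ [i]) := by
  by_cases h : d.contains t = true
  · simp [h]
  · simp only [Bool.not_eq_true] at h
    simp only [h, Bool.false_eq_true, if_false, PySem.Dict.modify,
      PySem.Dict.getD_insert_self, PySem.Dict.insert_insert_self,
      PySem.Dict.getD_of_not_contains d ([] : List Int) h]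

-- A's grouping loop is the plain modify-append fold over the flat (tick, index) pair list
lemma loopA_eq (l : List (Int × String)) (d : PySem.Dict Int (List Int)) :
    l.foldl (fun d p =>
      if PySem.Str.strIsdigit p.2 then
        let tick : Int := (PySem.Int.ofStrBase? p.2 2).getD 0
        let d' := if d.contains tick then d else d.insert tick ([] : List Int)
        d'.modify tick [] (· ++ [p.1])
      else d) d
    = (l.filterMap (fun p =>
        if PySem.Str.strIsdigit p.2 then some (((PySem.Int.ofStrBase? p.2 2).getD 0 : Int), p.1) else none)).foldl
        (fun d q => d.modify q.1 [] (· ++ [q.2])) d := by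
  induction l generalizing d with
  | nil => rfl
  | cons x l ih =>
    by_cases h : PySem.Str.strIsdigit x.2 = true
    · simp only [List.foldl_cons, List.filterMap_cons, h, if_true]
      rw [← ih]
      congr 1
      exact stepA_eq_modify d _ x.1
    · simp only [List.foldl_cons, List.filterMap_cons, h, Bool.false_eq_true, if_false]
      exact ih d

-- the whole of A's body equals the whole of B's body, for any column of strings
lemma core_average_signal_data_by_tick (xs : List String) :
    (PySem.List.sorted
      ((PySem.List.enumerate xs).foldl
        (fun d p =>
          if PySem.Str.strIsdigit p.2 then
            let tick : Int := (PySem.Int.ofStrBase? p.2 2).getD 0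
            let d' := if d.contains tick then d else d.insert tick ([] : List Int)
            d'.modify tick [] (· ++ [p.1])
          else d)
        PySem.Dict.empty).items
      (fun item => item.1) false).map
      (fun q => (q.1, (PySem.List.pyGet? q.2 (PySem.Int.floordiv (q.2.length : Int) 2)).getD 0))
    =
    (PySem.List.sorted
      (PySem.Set.ofList (((PySem.List.enumerate xs).filterMap
          (fun p => if PySem.Str.strIsdigit p.2 then some (((PySem.Int.ofStrBase? p.2 2).getD 0 : Int), p.1) else none)).map (·.1)))
      (fun t => t) false).map
      (fun t =>
        let idxs := (((PySem.List.enumerate xs).filterMap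
            (fun p => if PySem.Str.strIsdigit p.2 then some (((PySem.Int.ofStrBase? p.2 2).getD 0 : Int), p.1) else none)).filter
            (fun q => q.1 == t)).map (·.2)
        (t, (PySem.List.pyGet? idxs (PySem.Int.floordiv (idxs.length : Int) 2)).getD 0)) := by
  rw [loopA_eq]
  set P := (PySem.List.enumerate xs).filterMap
      (fun p => if PySem.Str.strIsdigit p.2 then some (((PySem.Int.ofStrBase? p.2 2).getD 0 : Int), p.1) else none) with hP
  set dA := P.foldl (fun d q => d.modify q.1 [] (· ++ [q.2])) PySem.Dict.empty with hdA
  have hkeys : dA.keys = PySem.Set.ofList (P.map (·.1)) := by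
    have h := PySem.Dict.keys_foldl_modify_key P (fun q => q.1) ([] : List Int)
      (fun _ q l => l ++ [q.2]) PySem.Dict.empty
    simp only [PySem.Dict.keys_empty, PySem.Set.update_nil_left] at h
    exact h
  have hnodup : dA.keys.Nodup :=
    PySem.Dict.nodup_keys_foldl_modify_key P (fun q => q.1) ([] : List Int)
      (fun _ q l => l ++ [q.2]) PySem.Dict.empty PySem.Dict.nodup_keys_empty
  have hget : ∀ t : Int, dA.getD t [] = (P.filter (fun q => q.1 == t)).map (·.2) := by
    intro t
    have h := PySem.Dict.getD_foldl_modify_append P PySem.Dict.empty t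
    simpa using h
  have hitems := PySem.Dict.items_eq_map_keys dA hnodup ([] : List Int)
  have hsorted : PySem.List.sorted dA.items (fun item => item.1) false
      = (PySem.List.sorted (PySem.Set.ofList (P.map (·.1))) (fun t => t) false).map
          (fun t => (t, dA.getD t [])) := by
    apply PySem.List.sorted_eq_of_perm_of_pairwise_lt
    · rw [hitems, hkeys]
      exact (PySem.List.sorted_perm _ _ _).map _
    · exact List.Pairwise.map _ (fun a b h => h) (PySem.List.sorted_ofList_pairwise_lt _)
  rw [hsorted, List.map_map]
  refine List.map_congr_left ?_
  intro t ht
  simp only [Function.comp_apply, hget t]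

-- ===== VERDICT (by name: the statement is the Claim_ definition above) =====
theorem average_signal_data_by_tick_spec : Claim_equal_average_signal_data_by_tick := by
  intro data _ _
  show average_signal_data_by_tick data = average_signal_data_by_tick_alt data
  exact core_average_signal_data_by_tick ((List.lookup "/tb/cyc_cnt" data).getD [])
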